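-- pv_equiv track=rewrite | github.com/owaski/Expressive-S2S | index-tts/data_processing/Emilia/diar_split.py | has_more_than_one_speaker
-- ===== SOURCE A (Python) =====
-- def has_more_than_one_speaker(segment_parts):
--     if not segment_parts:
--         return False
--     if len(segment_parts) == 1:
--         return False
--     # segment_parts = [part.split(" ") for part in segment_parts]
--     spk = segment_parts[0][-1]
--     for segment_part in segment_parts[1:]:
--         if segment_part[-1] != spk:
--             return True
--     return False
-- ===== SOURCE B (Python) =====
-- def has_more_than_one_speaker(segment_parts):
--     speakers = {part[-1] for part in segment_parts}
--     return len(speakers) > 1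
-- ===== Notes on version B (the rewrite author's own statement) =====
-- stated objective: idiomatic
-- what changed: B collects the distinct speaker labels (last field of each part) into a set in one comprehension and returns len(set) > 1, replacing A's length guards, reference element and early-exit comparison loop.
-- outside the precondition, e.g. on has_more_than_one_speaker([[]]): A returns False, B raises IndexError; on has_more_than_one_speaker([['a'], ['b'], []]): A returns True, B raises IndexError
import Mathlib
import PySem

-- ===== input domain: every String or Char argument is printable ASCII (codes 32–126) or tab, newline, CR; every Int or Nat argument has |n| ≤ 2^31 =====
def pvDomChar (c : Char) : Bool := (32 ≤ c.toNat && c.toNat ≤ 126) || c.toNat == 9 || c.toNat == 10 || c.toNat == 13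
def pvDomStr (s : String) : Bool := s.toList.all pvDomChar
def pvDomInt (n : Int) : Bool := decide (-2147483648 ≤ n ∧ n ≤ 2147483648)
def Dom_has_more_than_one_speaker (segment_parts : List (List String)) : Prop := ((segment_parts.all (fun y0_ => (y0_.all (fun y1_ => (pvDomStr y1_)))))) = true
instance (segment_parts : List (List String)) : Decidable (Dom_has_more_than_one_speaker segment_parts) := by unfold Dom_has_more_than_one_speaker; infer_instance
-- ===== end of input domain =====

-- B replaces A's length guards + reference element + early-exit loop by collecting the
-- distinct speaker labels into a set and testing its size (idiomatic; same O(n) cost).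

-- part[-1], total form: exact whenever the part is nonempty (guaranteed by Pre_).
def pvLast (p : List String) : String := (PySem.List.pyGet? p (-1)).getD ""

-- ===== PORT A =====
-- the 'for segment_part in segment_parts[1:]' loop with its early 'return True'
def hmA_loop (spk : String) : List (List String) → Bool
  | [] => false
  | p :: ps => if pvLast p ≠ spk then true else hmA_loop spk ps

def has_more_than_one_speaker (segment_parts : List (List String)) : Bool :=
  match segment_parts with
  | [] => false
  | [_] => false
  | first :: rest => hmA_loop (pvLast first) rest

-- ===== PORT B =====
def has_more_than_one_speaker_alt (segment_parts : List (List String)) : Bool :=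
  decide (1 < (PySem.Set.ofList (segment_parts.map (fun part => pvLast part))).length)

-- ===== PRECONDITION & SPEC =====
-- Pre_ excludes inputs containing an empty part: there part[-1] is an IndexError —
-- A raises on it whenever its loop reaches one, and B's set comprehension always raises.
def Pre_has_more_than_one_speaker (segment_parts : List (List String)) : Prop :=
  ∀ p ∈ segment_parts, p ≠ []
instance (segment_parts : List (List String)) : Decidable (Pre_has_more_than_one_speaker segment_parts) := by unfold Pre_has_more_than_one_speaker; infer_instance

def pvWitness_has_more_than_one_speaker : List (List String) := [["a"], ["b"]]

def Spec_has_more_than_one_speaker (segment_parts : List (List String)) (out : Bool) : Prop := out = has_more_than_one_speaker_alt segment_parts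
instance (segment_parts : List (List String)) (out : Bool) : Decidable (Spec_has_more_than_one_speaker segment_parts out) := by unfold Spec_has_more_than_one_speaker; infer_instance

-- ===== CLAIM (what is proved, stated in full; the proofs are below) =====
def Claim_equal_has_more_than_one_speaker : Prop := ∀ (segment_parts : List (List String)), Dom_has_more_than_one_speaker segment_parts → Pre_has_more_than_one_speaker segment_parts → Spec_has_more_than_one_speaker segment_parts (has_more_than_one_speaker segment_parts)

-- ===== LEMMAS AND PROOFS =====

theorem hmA_loop_eq_any (spk : String) (ps : List (List String)) :
    hmA_loop spk ps = ps.any (fun p => pvLast p ≠ spk) := by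
  induction ps with
  | nil => rfl
  | cons p ps ih => by_cases h : pvLast p = spk <;> simp [hmA_loop, h, ih]

theorem foldl_add_len_mono (xs : List String) (s : List String) :
    s.length ≤ (List.foldl PySem.Set.add s xs).length := by
  induction xs generalizing s with
  | nil => simp
  | cons y ys ih =>
    refine le_trans ?_ (ih (PySem.Set.add s y))
    unfold PySem.Set.add
    split <;> simp

theorem card_gt_one (xs : List String) (x : String) :
    decide (1 < (List.foldl PySem.Set.add [x] xs).length) = xs.any (fun y => y ≠ x) := by
  induction xs with
  | nil => simp
  | cons y ys ih =>
    by_cases h : y = x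
    · simpa [PySem.Set.add, h] using ih
    · have h2 : 2 ≤ (List.foldl PySem.Set.add [x, y] ys).length :=
        foldl_add_len_mono ys [x, y]
      simp [PySem.Set.add, h]
      omega

-- ===== VERDICT (by name: the statement is the Claim_ definition above) =====
theorem has_more_than_one_speaker_spec : Claim_equal_has_more_than_one_speaker := by
  intro sp _ _
  unfold Spec_has_more_than_one_speaker has_more_than_one_speaker has_more_than_one_speaker_alt
  match sp with
  | [] => decide
  | [p] => simp [PySem.Set.ofList, PySem.Set.add]
  | a :: b :: rest =>
    show hmA_loop (pvLast a) (b :: rest) = _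
    rw [hmA_loop_eq_any]
    have hof : PySem.Set.ofList ((a :: b :: rest).map (fun part => pvLast part))
        = List.foldl PySem.Set.add [pvLast a] ((b :: rest).map (fun part => pvLast part)) := by
      rfl
    rw [hof, card_gt_one]
    simp [List.any_map]
    rfl
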